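-- pv_equiv track=rewrite | github.com/v4nn4/glyphs-generator | glyphs_generator/intersect.py | are_strokes_linked
-- ===== SOURCE A (Python) =====
-- from typing import List
--
-- def dfs(node: int, visited: set, subgraph: List[List[int]], stroke_indices: dict):
--     """
--     Depth-First Search to mark all nodes reachable from the current node.
--
--     :param node: Current node being visited.
--     :param visited: Set of already visited nodes.
--     :param adjacency_matrix: Matrix indicating edges between nodes.
--     """
--     visited.add(node)
--     for neighbor in range(len(subgraph)):
--         if subgraph[node][neighbor] and neighbor not in visited:
--             dfs(neighbor, visited, subgraph, stroke_indices)
--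
-- def are_strokes_linked(strokes: List[int], intersection_matrix: List[List[int]]) -> bool:
--     """
--     Determines if the specified strokes are linked based on a subgraph of the intersection matrix.
--
--     :param strokes: List of stroke indices to check.
--     :param intersection_matrix: Full intersection matrix.
--     :return: True if all specified strokes are linked, False otherwise.
--     """
--     if not strokes:
--         return False
--
--     # Create a subgraph that includes only the strokes of interest.
--     stroke_indices = {stroke: idx for idx, stroke in enumerate(strokes)}
--     subgraph = [[0 for _ in strokes] for _ in strokes]
--     for i, stroke1 in enumerate(strokes):
--         for j, stroke2 in enumerate(strokes):
--             subgraph[i][j] = intersection_matrix[stroke1][stroke2]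
--
--     visited = set()
--     # Start DFS from the first stroke in the subgraph
--     dfs(0, visited, subgraph, stroke_indices)
--
--     # Check if all strokes in the subgraph are reachable (visited)
--     return len(visited) == len(strokes)
-- ===== SOURCE B (Python) =====
-- from typing import List
--
-- def are_strokes_linked(strokes: List[int], intersection_matrix: List[List[int]]) -> bool:
--     # Iterative worklist traversal over stroke positions, indexing the full
--     # matrix directly instead of materialising a subgraph first.
--     if not strokes:
--         return False
--     n = len(strokes)
--     visited = {0}
--     stack = [0]
--     while stack:
--         i = stack.pop()
--         for j in range(n):
--             if j not in visited and intersection_matrix[strokes[i]][strokes[j]]: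
--                 visited.add(j)
--                 stack.append(j)
--     return len(visited) == n
-- ===== Notes on version B (the rewrite author's own statement) =====
-- stated objective: alternative
-- what changed: Replaces the recursive DFS over a separately materialised n×n subgraph matrix with an iterative explicit-stack traversal that indexes intersection_matrix[strokes[i]][strokes[j]] directly and marks nodes at push time (no subgraph allocation, no recursion).
import Mathlib
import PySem

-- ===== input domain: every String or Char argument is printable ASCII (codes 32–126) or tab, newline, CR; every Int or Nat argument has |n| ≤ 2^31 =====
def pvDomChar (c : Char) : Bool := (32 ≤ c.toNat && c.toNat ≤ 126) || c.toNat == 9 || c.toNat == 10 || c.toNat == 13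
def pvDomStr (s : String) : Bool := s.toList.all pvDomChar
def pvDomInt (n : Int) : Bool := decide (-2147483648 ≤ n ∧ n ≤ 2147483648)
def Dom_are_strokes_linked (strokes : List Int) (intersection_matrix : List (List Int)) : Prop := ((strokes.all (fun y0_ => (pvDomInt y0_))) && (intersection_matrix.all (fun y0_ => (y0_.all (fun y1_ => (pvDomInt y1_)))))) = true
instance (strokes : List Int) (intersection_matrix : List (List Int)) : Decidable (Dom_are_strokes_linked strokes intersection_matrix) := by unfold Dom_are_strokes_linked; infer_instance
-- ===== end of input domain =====

-- B replaces A's recursive DFS over a separately built n×n subgraph matrix by an iterative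
-- explicit-stack traversal indexing the full matrix directly; equal return value on Pre_.

-- ===== PORT A =====
-- m[s][t] as Python evaluates it; Pre_ guarantees both pyGet? are `some`, so the getD
-- defaults are never reached on admitted inputs.
def pvEntry (m : List (List Int)) (s t : Int) : Int :=
  (PySem.List.pyGet? ((PySem.List.pyGet? m s).getD []) t).getD 0

-- A's recursive dfs; the Nat fuel (strokes.length at the call site) is only a totality
-- device: recursion depth is bounded by the number of distinct visited nodes.
def pvDfsA (sub : List (List Int)) : Nat → Nat → PySem.Set Nat → PySem.Set Nat
  | 0, _, visited => visited
  | fuel+1, node, visited =>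
      (List.range sub.length).foldl
        (fun (v : PySem.Set Nat) (nb : Nat) =>
          if pvEntry sub (node : Int) (nb : Int) ≠ 0 ∧ nb ∉ v then pvDfsA sub fuel nb v else v)
        (PySem.Set.add visited node)

-- (Python also builds the dict `stroke_indices`, which is dead: it is never read.)
def are_strokes_linked (strokes : List Int) (intersection_matrix : List (List Int)) : Bool :=
  if strokes = [] then false
  else
    let subgraph := strokes.map (fun s1 => strokes.map (fun s2 => pvEntry intersection_matrix s1 s2))
    let visited := pvDfsA subgraph strokes.length 0 PySem.Set.empty
    PySem.Set.len visited == (strokes.length : Int)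

-- ===== PORT B =====
def pvEdgeB (strokes : List Int) (m : List (List Int)) (i j : Nat) : Bool :=
  decide (pvEntry m (PySem.List.pyGetD strokes (i : Int) 0) (PySem.List.pyGetD strokes (j : Int) 0) ≠ 0)

-- B's while-loop over the explicit stack (Python list end = Lean list head: append = cons,
-- pop = head); the fuel (n at the call site) is only a totality device: each pop matches a
-- push and pushes are fresh nodes, so there are at most n iterations.
def pvLoopB (strokes : List Int) (m : List (List Int)) (n : Nat) :
    Nat → List Nat → PySem.Set Nat → PySem.Set Nat
  | 0, _, visited => visited
  | _+1, [], visited => visited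
  | fuel+1, i :: rest, visited =>
      let p := (List.range n).foldl
        (fun (p : PySem.Set Nat × List Nat) j =>
          if j ∉ p.1 ∧ pvEdgeB strokes m i j then (PySem.Set.add p.1 j, j :: p.2) else p)
        (visited, rest)
      pvLoopB strokes m n fuel p.2 p.1

def are_strokes_linked_alt (strokes : List Int) (intersection_matrix : List (List Int)) : Bool :=
  if strokes = [] then false
  else
    let n := strokes.length
    let visited := pvLoopB strokes intersection_matrix n n [0] (PySem.Set.ofList [0])
    PySem.Set.len visited == (n : Int)

-- ===== PRECONDITION & SPEC =====
-- Pre_ excludes exactly the inputs on which Python A raises IndexError: some pair of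
-- strokes fails to index intersection_matrix (A indexes every pair while building subgraph).
def Pre_are_strokes_linked (strokes : List Int) (intersection_matrix : List (List Int)) : Prop :=
  ∀ s ∈ strokes, (PySem.List.pyGet? intersection_matrix s).isSome = true ∧
    ∀ t ∈ strokes,
      (PySem.List.pyGet? ((PySem.List.pyGet? intersection_matrix s).getD []) t).isSome = true
instance (strokes : List Int) (intersection_matrix : List (List Int)) : Decidable (Pre_are_strokes_linked strokes intersection_matrix) := by unfold Pre_are_strokes_linked; infer_instance
def pvWitness_are_strokes_linked : List Int × List (List Int) := ([0, 1], [[1, 1], [0, 0]])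

def Spec_are_strokes_linked (strokes : List Int) (intersection_matrix : List (List Int)) (out : Bool) : Prop := out = are_strokes_linked_alt strokes intersection_matrix
instance (strokes : List Int) (intersection_matrix : List (List Int)) (out : Bool) : Decidable (Spec_are_strokes_linked strokes intersection_matrix out) := by unfold Spec_are_strokes_linked; infer_instance

-- ===== CLAIM (what is proved, stated in full; the proofs are below) =====
def Claim_equal_are_strokes_linked : Prop := ∀ (strokes : List Int) (intersection_matrix : List (List Int)), Dom_are_strokes_linked strokes intersection_matrix → Pre_are_strokes_linked strokes intersection_matrix → Spec_are_strokes_linked strokes intersection_matrix (are_strokes_linked strokes intersection_matrix)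

-- ===== LEMMAS AND PROOFS =====

-- Directed reachability from s through edge test e among nodes < n.
inductive pvReach (e : Nat → Nat → Bool) (n : Nat) (s : Nat) : Nat → Prop
  | refl : pvReach e n s s
  | step {i j : Nat} : pvReach e n s i → j < n → e i j = true → pvReach e n s j

-- A's edge test, read off the subgraph matrix.
def pvEA (sub : List (List Int)) (i j : Nat) : Bool := decide (pvEntry sub (i : Int) (j : Int) ≠ 0)

-- number of not-yet-visited nodes (proof-only measure)
def pvK (n : Nat) (v : List Nat) : Nat := ((Finset.range n).filter (fun x => x ∉ v)).card

lemma pvReach_lt {e n s x} (h : pvReach e n s x) : x = s ∨ x < n := by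
  induction h with
  | refl => exact Or.inl rfl
  | step _ hj _ _ => exact Or.inr hj

lemma pvReach_head {e n s t x} (het : e s t = true) (htn : t < n)
    (h : pvReach e n t x) : pvReach e n s x := by
  induction h with
  | refl => exact pvReach.step pvReach.refl htn het
  | step _ hj he ih => exact pvReach.step ih hj he

lemma pvReach_congr {e₁ e₂ : Nat → Nat → Bool} {n s x}
    (hee : ∀ i j, i < n → j < n → e₁ i j = e₂ i j) (hs : s < n)
    (h : pvReach e₁ n s x) : pvReach e₂ n s x := by
  induction h with
  | refl => exact pvReach.refl
  | step hr hj he ih =>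
      rename_i i j
      have hi : i < n := (pvReach_lt hr).elim (fun h => h ▸ hs) id
      exact pvReach.step ih hj ((hee i j hi hj).symm.trans he)

lemma pvK_lt {n : Nat} {v v' : List Nat} (hsub : ∀ x ∈ v, x ∈ v') {node : Nat}
    (hn : node < n) (h1 : node ∉ v) (h2 : node ∈ v') : pvK n v' < pvK n v := by
  apply Finset.card_lt_card
  constructor
  · intro x hx
    simp only [Finset.mem_filter, Finset.mem_range] at *
    exact ⟨hx.1, fun hv => hx.2 (hsub x hv)⟩
  · intro hsup
    have hmem : node ∈ (Finset.range n).filter (fun x => x ∉ v) := by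
      simp only [Finset.mem_filter, Finset.mem_range]; exact ⟨hn, h1⟩
    have := hsup hmem
    simp only [Finset.mem_filter] at this
    exact this.2 h2

lemma pvK_empty (n : Nat) : pvK n PySem.Set.empty = n := by
  simp [pvK, PySem.Set.empty]

lemma pvK_add_fresh {n j : Nat} {v : PySem.Set Nat} (hj : j < n) (hjv : j ∉ v) :
    pvK n (PySem.Set.add v j) + 1 = pvK n v := by
  have hset : (Finset.range n).filter (fun x => x ∉ PySem.Set.add v j)
      = ((Finset.range n).filter (fun x => x ∉ v)).erase j := by
    ext x
    simp only [Finset.mem_erase, Finset.mem_filter, Finset.mem_range, PySem.Set.mem_add]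
    constructor
    · intro ⟨h1, h2⟩
      exact ⟨fun he => h2 (Or.inr he), h1, fun hv => h2 (Or.inl hv)⟩
    · intro ⟨h1, h2, h3⟩
      exact ⟨h2, fun h => h.elim h3 h1⟩
  have hmem : j ∈ (Finset.range n).filter (fun x => x ∉ v) := by
    simp only [Finset.mem_filter, Finset.mem_range]; exact ⟨hj, hjv⟩
  unfold pvK
  rw [hset, Finset.card_erase_add_one hmem]

lemma pvFoldA_sound (sub : List (List Int)) (fuel : Nat)
    (IH : ∀ (node : Nat) (v : PySem.Set Nat), List.Nodup v →
      List.Nodup (pvDfsA sub fuel node v) ∧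
      (∀ x ∈ v, x ∈ pvDfsA sub fuel node v) ∧
      (∀ x ∈ pvDfsA sub fuel node v, x ∈ v ∨ pvReach (pvEA sub) sub.length node x)) :
    ∀ (l : List Nat), (∀ nb ∈ l, nb < sub.length) →
      ∀ (node : Nat) (v₀ : PySem.Set Nat), List.Nodup v₀ →
      List.Nodup (l.foldl (fun (v : PySem.Set Nat) (nb : Nat) =>
          if pvEntry sub (node : Int) (nb : Int) ≠ 0 ∧ nb ∉ v then pvDfsA sub fuel nb v else v) v₀) ∧
      (∀ x ∈ v₀, x ∈ l.foldl (fun (v : PySem.Set Nat) (nb : Nat) =>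
          if pvEntry sub (node : Int) (nb : Int) ≠ 0 ∧ nb ∉ v then pvDfsA sub fuel nb v else v) v₀) ∧
      (∀ x ∈ l.foldl (fun (v : PySem.Set Nat) (nb : Nat) =>
          if pvEntry sub (node : Int) (nb : Int) ≠ 0 ∧ nb ∉ v then pvDfsA sub fuel nb v else v) v₀,
        x ∈ v₀ ∨ pvReach (pvEA sub) sub.length node x) := by
  intro l
  induction l with
  | nil =>
      intro _ node v₀ h₀
      exact ⟨h₀, fun x hx => hx, fun x hx => Or.inl hx⟩
  | cons nb l ih =>
      intro hl node v₀ h₀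
      simp only [List.foldl_cons]
      have hnb : nb < sub.length := hl nb (List.mem_cons_self ..)
      by_cases hc : pvEntry sub (node : Int) (nb : Int) ≠ 0 ∧ nb ∉ v₀
      · rw [if_pos hc]
        obtain ⟨hn1, hn2, hn3⟩ := IH nb v₀ h₀
        obtain ⟨hr1, hr2, hr3⟩ := ih (fun x hx => hl x (List.mem_cons_of_mem _ hx)) node _ hn1
        refine ⟨hr1, fun x hx => hr2 x (hn2 x hx), fun x hx => ?_⟩
        rcases hr3 x hx with hx' | hr
        · rcases hn3 x hx' with hx'' | hr
          · exact Or.inl hx''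
          · refine Or.inr (pvReach_head ?_ hnb hr)
            simpa [pvEA] using hc.1
        · exact Or.inr hr
      · rw [if_neg hc]
        exact ih (fun x hx => hl x (List.mem_cons_of_mem _ hx)) node v₀ h₀

lemma pvDfsA_sound (sub : List (List Int)) :
    ∀ (fuel node : Nat) (v : PySem.Set Nat), List.Nodup v →
      List.Nodup (pvDfsA sub fuel node v) ∧
      (∀ x ∈ v, x ∈ pvDfsA sub fuel node v) ∧
      (∀ x ∈ pvDfsA sub fuel node v, x ∈ v ∨ pvReach (pvEA sub) sub.length node x) := by
  intro fuel
  induction fuel with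
  | zero =>
      intro node v h
      exact ⟨h, fun x hx => hx, fun x hx => Or.inl hx⟩
  | succ fuel ih =>
      intro node v h
      simp only [pvDfsA]
      obtain ⟨h1, h2, h3⟩ := pvFoldA_sound sub fuel ih (List.range sub.length)
        (fun nb hnb => List.mem_range.1 hnb) node (PySem.Set.add v node)
        (PySem.Set.nodup_add v node h)
      refine ⟨h1, fun x hx => h2 x ((PySem.Set.mem_add v node x).2 (Or.inl hx)), fun x hx => ?_⟩
      rcases h3 x hx with hx' | hr
      · rcases (PySem.Set.mem_add v node x).1 hx' with h' | h'
        · exact Or.inl h'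
        · exact Or.inr (h' ▸ pvReach.refl)
      · exact Or.inr hr

lemma pvFoldA_complete (sub : List (List Int)) (fuel : Nat)
    (IHs : ∀ (node : Nat) (v : PySem.Set Nat), List.Nodup v →
      List.Nodup (pvDfsA sub fuel node v) ∧
      (∀ x ∈ v, x ∈ pvDfsA sub fuel node v) ∧
      (∀ x ∈ pvDfsA sub fuel node v, x ∈ v ∨ pvReach (pvEA sub) sub.length node x))
    (IHc : ∀ (node : Nat) (v : PySem.Set Nat), List.Nodup v → node < sub.length → node ∉ v →
      pvK sub.length v ≤ fuel →
      node ∈ pvDfsA sub fuel node v ∧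
      (∀ x ∈ pvDfsA sub fuel node v, x ∉ v →
        ∀ j, j < sub.length → pvEA sub x j = true → j ∈ pvDfsA sub fuel node v)) :
    ∀ (l : List Nat), (∀ nb ∈ l, nb < sub.length) →
      ∀ (node : Nat) (A₀ v₀ : PySem.Set Nat), List.Nodup v₀ →
      (∀ x ∈ A₀, x ∈ v₀) →
      (∀ x ∈ v₀, x ∉ A₀ → ∀ j, j < sub.length → pvEA sub x j = true → j ∈ v₀) →
      pvK sub.length v₀ ≤ fuel →
      List.Nodup (l.foldl (fun (v : PySem.Set Nat) (nb : Nat) =>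
          if pvEntry sub (node : Int) (nb : Int) ≠ 0 ∧ nb ∉ v then pvDfsA sub fuel nb v else v) v₀) ∧
      (∀ x ∈ v₀, x ∈ l.foldl (fun (v : PySem.Set Nat) (nb : Nat) =>
          if pvEntry sub (node : Int) (nb : Int) ≠ 0 ∧ nb ∉ v then pvDfsA sub fuel nb v else v) v₀) ∧
      (∀ x ∈ l.foldl (fun (v : PySem.Set Nat) (nb : Nat) =>
          if pvEntry sub (node : Int) (nb : Int) ≠ 0 ∧ nb ∉ v then pvDfsA sub fuel nb v else v) v₀,
        x ∉ A₀ → ∀ j, j < sub.length → pvEA sub x j = true →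
          j ∈ l.foldl (fun (v : PySem.Set Nat) (nb : Nat) =>
          if pvEntry sub (node : Int) (nb : Int) ≠ 0 ∧ nb ∉ v then pvDfsA sub fuel nb v else v) v₀) ∧
      (∀ nb ∈ l, pvEA sub node nb = true → nb ∈ l.foldl (fun (v : PySem.Set Nat) (nb : Nat) =>
          if pvEntry sub (node : Int) (nb : Int) ≠ 0 ∧ nb ∉ v then pvDfsA sub fuel nb v else v) v₀) ∧
      pvK sub.length (l.foldl (fun (v : PySem.Set Nat) (nb : Nat) =>
          if pvEntry sub (node : Int) (nb : Int) ≠ 0 ∧ nb ∉ v then pvDfsA sub fuel nb v else v) v₀) ≤ fuel := by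
  intro l
  induction l with
  | nil =>
      intro _ node A₀ v₀ h₀ hA hcl hk
      exact ⟨h₀, fun x hx => hx, fun x hx => hcl x hx, fun nb hnb => absurd hnb (List.not_mem_nil),
        hk⟩
  | cons nb l ih =>
      intro hl node A₀ v₀ h₀ hA hcl hk
      simp only [List.foldl_cons]
      have hnb : nb < sub.length := hl nb (List.mem_cons_self ..)
      by_cases hc : pvEntry sub (node : Int) (nb : Int) ≠ 0 ∧ nb ∉ v₀
      · rw [if_pos hc]
        obtain ⟨hs1, hs2, hs3⟩ := IHs nb v₀ h₀
        obtain ⟨hc1, hc2⟩ := IHc nb v₀ h₀ hnb hc.2 hk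
        have hk' : pvK sub.length (pvDfsA sub fuel nb v₀) ≤ fuel :=
          le_of_lt (lt_of_lt_of_le (pvK_lt hs2 hnb hc.2 hc1) hk)
        have hcl' : ∀ x ∈ pvDfsA sub fuel nb v₀, x ∉ A₀ →
            ∀ j, j < sub.length → pvEA sub x j = true → j ∈ pvDfsA sub fuel nb v₀ := by
          intro x hx hxA j hj he
          by_cases hxv : x ∈ v₀
          · exact hs2 j (hcl x hxv hxA j hj he)
          · exact hc2 x hx hxv j hj he
        obtain ⟨hr1, hr2, hr3, hr4, hr5⟩ := ih (fun x hx => hl x (List.mem_cons_of_mem _ hx))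
          node A₀ _ hs1 (fun x hx => hs2 x (hA x hx)) hcl' hk'
        refine ⟨hr1, fun x hx => hr2 x (hs2 x hx), hr3, fun nb' hnb' he => ?_, hr5⟩
        rcases List.mem_cons.1 hnb' with h' | h'
        · exact h' ▸ hr2 nb (h' ▸ hc1)
        · exact hr4 nb' h' he
      · rw [if_neg hc]
        obtain ⟨hr1, hr2, hr3, hr4, hr5⟩ := ih (fun x hx => hl x (List.mem_cons_of_mem _ hx))
          node A₀ v₀ h₀ hA hcl hk
        refine ⟨hr1, hr2, hr3, fun nb' hnb' he => ?_, hr5⟩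
        rcases List.mem_cons.1 hnb' with h' | h'
        · subst h'
          have hmem : nb' ∈ v₀ := by
            by_contra hn
            exact hc ⟨by simpa [pvEA] using he, hn⟩
          exact hr2 nb' hmem
        · exact hr4 nb' h' he

lemma pvDfsA_complete (sub : List (List Int)) :
    ∀ (fuel node : Nat) (v : PySem.Set Nat), List.Nodup v → node < sub.length → node ∉ v →
      pvK sub.length v ≤ fuel →
      node ∈ pvDfsA sub fuel node v ∧
      (∀ x ∈ pvDfsA sub fuel node v, x ∉ v →
        ∀ j, j < sub.length → pvEA sub x j = true → j ∈ pvDfsA sub fuel node v) := by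
  intro fuel
  induction fuel with
  | zero =>
      intro node v hnd hn hnv hk
      exfalso
      have : pvK sub.length (PySem.Set.add v node) < pvK sub.length v :=
        pvK_lt (fun x hx => (PySem.Set.mem_add v node x).2 (Or.inl hx)) hn hnv
          ((PySem.Set.mem_add v node node).2 (Or.inr rfl))
      omega
  | succ fuel ih =>
      intro node v hnd hn hnv hk
      simp only [pvDfsA]
      have hknode : pvK sub.length (PySem.Set.add v node) ≤ fuel := by
        have : pvK sub.length (PySem.Set.add v node) < pvK sub.length v :=
          pvK_lt (fun x hx => (PySem.Set.mem_add v node x).2 (Or.inl hx)) hn hnv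
            ((PySem.Set.mem_add v node node).2 (Or.inr rfl))
        omega
      obtain ⟨hr1, hr2, hr3, hr4, hr5⟩ := pvFoldA_complete sub fuel (pvDfsA_sound sub fuel) ih
        (List.range sub.length) (fun nb hnb => List.mem_range.1 hnb) node
        (PySem.Set.add v node) (PySem.Set.add v node) (PySem.Set.nodup_add v node hnd)
        (fun x hx => hx) (fun x hx hxA => absurd hx hxA) hknode
      refine ⟨hr2 node ((PySem.Set.mem_add v node node).2 (Or.inr rfl)), ?_⟩
      intro x hx hxv j hj he
      by_cases hxn : x = node
      · exact hr4 j (List.mem_range.2 hj) (hxn ▸ he)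
      · refine hr3 x hx ?_ j hj he
        intro hxA
        rcases (PySem.Set.mem_add v node x).1 hxA with h' | h'
        · exact hxv h'
        · exact hxn h'

lemma pvDfsA_spec (sub : List (List Int)) (h : 0 < sub.length) :
    List.Nodup (pvDfsA sub sub.length 0 PySem.Set.empty) ∧
    ∀ x, x ∈ pvDfsA sub sub.length 0 PySem.Set.empty ↔ pvReach (pvEA sub) sub.length 0 x := by
  have hk : pvK sub.length (PySem.Set.empty : PySem.Set Nat) ≤ sub.length := by
    rw [pvK_empty]
  obtain ⟨hc1, hc2⟩ := pvDfsA_complete sub sub.length 0 PySem.Set.empty List.nodup_nil h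
    (List.not_mem_nil) hk
  obtain ⟨hnd, _, hs3⟩ := pvDfsA_sound sub sub.length 0 PySem.Set.empty List.nodup_nil
  refine ⟨hnd, fun x => ?_⟩
  constructor
  · intro hx
    rcases hs3 x hx with h' | h'
    · exact absurd h' (List.not_mem_nil)
    · exact h'
  · intro hr
    induction hr with
    | refl => exact hc1
    | step hr' hj he ihr => exact hc2 _ (ihr) (List.not_mem_nil) _ hj he

lemma pvFoldB_inv (strokes : List Int) (m : List (List Int)) (n : Nat) (i : Nat)
    (hiv : pvReach (pvEdgeB strokes m) n 0 i) :
    ∀ (l : List Nat), (∀ j ∈ l, j < n) → ∀ (v₀ : PySem.Set Nat) (st₀ : List Nat),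
      List.Nodup v₀ → (∀ x ∈ st₀, x ∈ v₀) → (∀ x ∈ v₀, pvReach (pvEdgeB strokes m) n 0 x) →
      List.Nodup (l.foldl (fun (p : PySem.Set Nat × List Nat) (j : Nat) =>
          if j ∉ p.1 ∧ pvEdgeB strokes m i j then (PySem.Set.add p.1 j, j :: p.2) else p)
          (v₀, st₀)).1 ∧
      (∀ x ∈ v₀, x ∈ (l.foldl (fun (p : PySem.Set Nat × List Nat) (j : Nat) =>
          if j ∉ p.1 ∧ pvEdgeB strokes m i j then (PySem.Set.add p.1 j, j :: p.2) else p)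
          (v₀, st₀)).1) ∧
      (∀ x ∈ st₀, x ∈ (l.foldl (fun (p : PySem.Set Nat × List Nat) (j : Nat) =>
          if j ∉ p.1 ∧ pvEdgeB strokes m i j then (PySem.Set.add p.1 j, j :: p.2) else p)
          (v₀, st₀)).2) ∧
      (∀ x ∈ (l.foldl (fun (p : PySem.Set Nat × List Nat) (j : Nat) =>
          if j ∉ p.1 ∧ pvEdgeB strokes m i j then (PySem.Set.add p.1 j, j :: p.2) else p)
          (v₀, st₀)).2, x ∈ (l.foldl (fun (p : PySem.Set Nat × List Nat) (j : Nat) =>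
          if j ∉ p.1 ∧ pvEdgeB strokes m i j then (PySem.Set.add p.1 j, j :: p.2) else p)
          (v₀, st₀)).1) ∧
      (∀ x ∈ (l.foldl (fun (p : PySem.Set Nat × List Nat) (j : Nat) =>
          if j ∉ p.1 ∧ pvEdgeB strokes m i j then (PySem.Set.add p.1 j, j :: p.2) else p)
          (v₀, st₀)).1, pvReach (pvEdgeB strokes m) n 0 x) ∧
      (∀ x ∈ (l.foldl (fun (p : PySem.Set Nat × List Nat) (j : Nat) =>
          if j ∉ p.1 ∧ pvEdgeB strokes m i j then (PySem.Set.add p.1 j, j :: p.2) else p)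
          (v₀, st₀)).1, x ∈ v₀ ∨ x ∈ (l.foldl (fun (p : PySem.Set Nat × List Nat) (j : Nat) =>
          if j ∉ p.1 ∧ pvEdgeB strokes m i j then (PySem.Set.add p.1 j, j :: p.2) else p)
          (v₀, st₀)).2) ∧
      (∀ j ∈ l, pvEdgeB strokes m i j = true → j ∈ (l.foldl (fun (p : PySem.Set Nat × List Nat) (j : Nat) =>
          if j ∉ p.1 ∧ pvEdgeB strokes m i j then (PySem.Set.add p.1 j, j :: p.2) else p)
          (v₀, st₀)).1) ∧
      ((l.foldl (fun (p : PySem.Set Nat × List Nat) (j : Nat) =>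
          if j ∉ p.1 ∧ pvEdgeB strokes m i j then (PySem.Set.add p.1 j, j :: p.2) else p)
          (v₀, st₀)).2.length + pvK n (l.foldl (fun (p : PySem.Set Nat × List Nat) (j : Nat) =>
          if j ∉ p.1 ∧ pvEdgeB strokes m i j then (PySem.Set.add p.1 j, j :: p.2) else p)
          (v₀, st₀)).1 = st₀.length + pvK n v₀) := by
  intro l
  induction l with
  | nil =>
      intro _ v₀ st₀ h₀ hst hsnd
      exact ⟨h₀, fun x hx => hx, fun x hx => hx, hst, hsnd, fun x hx => Or.inl hx,
        fun j hj => absurd hj (List.not_mem_nil), rfl⟩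
  | cons j l ih =>
      intro hl v₀ st₀ h₀ hst hsnd
      simp only [List.foldl_cons]
      have hjn : j < n := hl j (List.mem_cons_self ..)
      by_cases hc : j ∉ v₀ ∧ pvEdgeB strokes m i j = true
      · rw [if_pos hc]
        have hadd : ∀ x ∈ v₀, x ∈ PySem.Set.add v₀ j :=
          fun x hx => (PySem.Set.mem_add v₀ j x).2 (Or.inl hx)
        have hjadd : j ∈ PySem.Set.add v₀ j := (PySem.Set.mem_add v₀ j j).2 (Or.inr rfl)
        obtain ⟨hr1, hr2, hr3, hr4, hr5, hr6, hr7, hr8⟩ :=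
          ih (fun x hx => hl x (List.mem_cons_of_mem _ hx)) (PySem.Set.add v₀ j) (j :: st₀)
            (PySem.Set.nodup_add v₀ j h₀)
            (fun x hx => (List.mem_cons.1 hx).elim (fun h => h ▸ hjadd) (fun h => hadd x (hst x h)))
            (fun x hx => (PySem.Set.mem_add v₀ j x).1 hx |>.elim (fun h => hsnd x h)
              (fun h => h ▸ pvReach.step hiv hjn hc.2))
        refine ⟨hr1, fun x hx => hr2 x (hadd x hx), fun x hx => hr3 x (List.mem_cons_of_mem _ hx),
          hr4, hr5, ?_, ?_, ?_⟩
        · intro x hx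
          rcases hr6 x hx with h' | h'
          · rcases (PySem.Set.mem_add v₀ j x).1 h' with h'' | h''
            · exact Or.inl h''
            · exact Or.inr (h'' ▸ hr3 j (List.mem_cons_self ..))
          · exact Or.inr h'
        · intro j' hj' he
          rcases List.mem_cons.1 hj' with h' | h'
          · exact h' ▸ hr2 j (h' ▸ hjadd)
          · exact hr7 j' h' he
        · have := pvK_add_fresh hjn hc.1
          simp only [List.length_cons] at hr8 ⊢
          omega
      · rw [if_neg hc]
        obtain ⟨hr1, hr2, hr3, hr4, hr5, hr6, hr7, hr8⟩ :=
          ih (fun x hx => hl x (List.mem_cons_of_mem _ hx)) v₀ st₀ h₀ hst hsnd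
        refine ⟨hr1, hr2, hr3, hr4, hr5, hr6, fun j' hj' he => ?_, hr8⟩
        rcases List.mem_cons.1 hj' with h' | h'
        · subst h'
          have hmem : j' ∈ v₀ := by
            by_contra hn
            exact hc ⟨hn, he⟩
          exact hr2 j' hmem
        · exact hr7 j' h' he

lemma pvLoopB_inv (strokes : List Int) (m : List (List Int)) (n : Nat) :
    ∀ (fuel : Nat) (stack : List Nat) (v : PySem.Set Nat), List.Nodup v →
      (∀ x ∈ stack, x ∈ v) →
      (∀ x ∈ v, pvReach (pvEdgeB strokes m) n 0 x) →
      (∀ x ∈ v, x ∉ stack → ∀ j, j < n → pvEdgeB strokes m x j = true → j ∈ v) →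
      stack.length + pvK n v ≤ fuel →
      List.Nodup (pvLoopB strokes m n fuel stack v) ∧
      (∀ x ∈ v, x ∈ pvLoopB strokes m n fuel stack v) ∧
      (∀ x ∈ pvLoopB strokes m n fuel stack v, pvReach (pvEdgeB strokes m) n 0 x) ∧
      (∀ x ∈ pvLoopB strokes m n fuel stack v,
        ∀ j, j < n → pvEdgeB strokes m x j = true → j ∈ pvLoopB strokes m n fuel stack v) := by
  intro fuel
  induction fuel with
  | zero =>
      intro stack v hnd hst hsnd hcl hk
      have hstack : stack = [] := List.eq_nil_of_length_eq_zero (by omega)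
      subst hstack
      exact ⟨hnd, fun x hx => hx, hsnd,
        fun x hx j hj he => hcl x hx (List.not_mem_nil) j hj he⟩
  | succ fuel ih =>
      intro stack v hnd hst hsnd hcl hk
      match stack with
      | [] =>
          exact ⟨hnd, fun x hx => hx, hsnd,
            fun x hx j hj he => hcl x hx (List.not_mem_nil) j hj he⟩
      | i :: rest =>
          simp only [pvLoopB]
          have hiv : pvReach (pvEdgeB strokes m) n 0 i := hsnd i (hst i (List.mem_cons_self ..))
          obtain ⟨hf1, hf2, hf3, hf4, hf5, hf6, hf7, hf8⟩ :=
            pvFoldB_inv strokes m n i hiv (List.range n) (fun j hj => List.mem_range.1 hj)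
              v rest hnd (fun x hx => hst x (List.mem_cons_of_mem _ hx)) hsnd
          have hcl' : ∀ x ∈ (((List.range n).foldl (fun (p : PySem.Set Nat × List Nat) (j : Nat) =>
              if j ∉ p.1 ∧ pvEdgeB strokes m i j then (PySem.Set.add p.1 j, j :: p.2) else p)
              (v, rest))).1, x ∉ (((List.range n).foldl (fun (p : PySem.Set Nat × List Nat) (j : Nat) =>
              if j ∉ p.1 ∧ pvEdgeB strokes m i j then (PySem.Set.add p.1 j, j :: p.2) else p)
              (v, rest))).2 → ∀ j, j < n → pvEdgeB strokes m x j = true →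
              j ∈ (((List.range n).foldl (fun (p : PySem.Set Nat × List Nat) (j : Nat) =>
              if j ∉ p.1 ∧ pvEdgeB strokes m i j then (PySem.Set.add p.1 j, j :: p.2) else p)
              (v, rest))).1 := by
            intro x hx hxst j hj he
            rcases hf6 x hx with hxv | hxs
            · by_cases hxi : x = i
              · exact hf7 j (List.mem_range.2 hj) (hxi ▸ he)
              · have hxrest : x ∉ rest := fun h => hxst (hf3 x h)
                have : x ∉ (i :: rest) := by
                  intro h
                  rcases List.mem_cons.1 h with h' | h'
                  · exact hxi h'
                  · exact hxrest h'
                exact hf2 j (hcl x hxv this j hj he)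
            · exact absurd hxs hxst
          have hk' : (((List.range n).foldl (fun (p : PySem.Set Nat × List Nat) (j : Nat) =>
              if j ∉ p.1 ∧ pvEdgeB strokes m i j then (PySem.Set.add p.1 j, j :: p.2) else p)
              (v, rest))).2.length + pvK n (((List.range n).foldl (fun (p : PySem.Set Nat × List Nat) (j : Nat) =>
              if j ∉ p.1 ∧ pvEdgeB strokes m i j then (PySem.Set.add p.1 j, j :: p.2) else p)
              (v, rest))).1 ≤ fuel := by
            simp only [List.length_cons] at hk
            omega
          obtain ⟨hr1, hr2, hr3, hr4⟩ := ih _ _ hf1 hf4 hf5 hcl' hk'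
          exact ⟨hr1, fun x hx => hr2 x (hf2 x hx), hr3, hr4⟩

lemma pvLoopB_spec (strokes : List Int) (m : List (List Int)) (n : Nat) (hn : 0 < n) :
    List.Nodup (pvLoopB strokes m n n [0] (PySem.Set.ofList [0])) ∧
    ∀ x, x ∈ pvLoopB strokes m n n [0] (PySem.Set.ofList [0]) ↔
      pvReach (pvEdgeB strokes m) n 0 x := by
  have h01 : (PySem.Set.ofList [0] : PySem.Set Nat) = PySem.Set.add PySem.Set.empty 0 := rfl
  have hk : (1 : Nat) + pvK n (PySem.Set.ofList [0] : PySem.Set Nat) ≤ n := by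
    rw [h01]
    have := pvK_add_fresh (v := (PySem.Set.empty : PySem.Set Nat)) hn (List.not_mem_nil)
    rw [pvK_empty] at this
    omega
  have h0mem : (0 : Nat) ∈ (PySem.Set.ofList [0] : PySem.Set Nat) :=
    (PySem.Set.mem_ofList [0] 0).2 (List.mem_cons_self ..)
  obtain ⟨hr1, hr2, hr3, hr4⟩ := pvLoopB_inv strokes m n n [0] (PySem.Set.ofList [0])
    (PySem.Set.nodup_ofList [0])
    (fun x hx => by
      rcases List.mem_cons.1 hx with h' | h'
      · exact h' ▸ h0mem
      · exact absurd h' (List.not_mem_nil))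
    (fun x hx => by
      rcases (PySem.Set.mem_ofList [0] x).1 hx with h'
      rcases List.mem_cons.1 h' with h'' | h''
      · exact h'' ▸ pvReach.refl
      · exact absurd h'' (List.not_mem_nil))
    (fun x hx hxst j hj he => by
      exfalso
      apply hxst
      rcases (PySem.Set.mem_ofList [0] x).1 hx with h'
      exact h')
    (by simpa using hk)
  refine ⟨hr1, fun x => ?_⟩
  constructor
  · exact hr3 x
  · intro hr
    induction hr with
    | refl => exact hr2 0 h0mem
    | step hr' hj he ihr => exact hr4 _ ihr _ hj he

lemma pvEdge_agree (strokes : List Int) (m : List (List Int)) :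
    ∀ i j, i < strokes.length → j < strokes.length →
      pvEA (strokes.map (fun s1 => strokes.map (fun s2 => pvEntry m s1 s2))) i j
        = pvEdgeB strokes m i j := by
  intro i j hi hj
  have hentry : pvEntry (strokes.map (fun s1 => strokes.map (fun s2 => pvEntry m s1 s2)))
      (i : Int) (j : Int) = pvEntry m strokes[i] strokes[j] := by
    simp [pvEntry, hi, hj]
  unfold pvEA pvEdgeB
  rw [hentry, PySem.List.pyGetD_natCast, PySem.List.pyGetD_natCast,
    List.getD_eq_getElem strokes 0 hi, List.getD_eq_getElem strokes 0 hj]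

-- ===== VERDICT (by name: the statement is the Claim_ definition above) =====
theorem are_strokes_linked_spec : Claim_equal_are_strokes_linked := by
  intro strokes m _ _
  unfold Spec_are_strokes_linked are_strokes_linked are_strokes_linked_alt
  by_cases hs : strokes = []
  · simp [hs]
  · have hn : 0 < strokes.length := List.length_pos_iff.2 hs
    set sub := strokes.map (fun s1 => strokes.map (fun s2 => pvEntry m s1 s2)) with hsub
    have hlen : sub.length = strokes.length := by simp [hsub]
    have hA := pvDfsA_spec sub (by rw [hlen]; exact hn)
    have hB := pvLoopB_spec strokes m strokes.length hn
    have hmem : ∀ x, x ∈ pvDfsA sub sub.length 0 PySem.Set.empty ↔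
        x ∈ pvLoopB strokes m strokes.length strokes.length [0] (PySem.Set.ofList [0]) := by
      intro x
      rw [hA.2 x, hB.2 x, hlen]
      have hee : ∀ i j, i < strokes.length → j < strokes.length →
          pvEA sub i j = pvEdgeB strokes m i j := pvEdge_agree strokes m
      constructor
      · exact pvReach_congr hee hn
      · exact pvReach_congr (fun i j hi hj => (hee i j hi hj).symm) hn
    have hperm := (List.perm_ext_iff_of_nodup hA.1 hB.1).2 hmem
    have hlen2 := hperm.length_eq
    rw [hlen] at hlen2
    simp only [PySem.Set.empty] at hlen2
    simp [hs, PySem.Set.len, hlen2]
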